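-- pv_equiv track=rewrite | github.com/OpenCIOC/onlineresources | python/cioc/web/cic/checklinks.py | pager
-- ===== SOURCE A (Python) =====
-- def pager(iterable, page_size=10):
--     page = []
--     count = 0
--     for x in iterable:
--         count += 1
--         page.append(x)
--         if count >= page_size:
--             yield page
--             count = 0
--             page = []
--
--     if page:
--         yield page
-- ===== SOURCE B (Python) =====
-- def pager(iterable, page_size=10):
--     items = list(iterable)
--     for i in range(0, len(items), page_size):
--         yield items[i:i+page_size]
-- ===== Notes on version B (the rewrite author's own statement) =====
-- stated objective: idiomatic
-- what changed: Replaces the per-element count/append/flush loop by stride-indexed slicing: materialize the input once and yield items[i:i+page_size] for i in range(0, len(items), page_size).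
-- outside the precondition, e.g. on pager([1, 2, 3], 0): A returns [[1], [2], [3]], B raises ValueError; on pager([1, 2], -1): A returns [[1], [2]], B returns []
import Mathlib
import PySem

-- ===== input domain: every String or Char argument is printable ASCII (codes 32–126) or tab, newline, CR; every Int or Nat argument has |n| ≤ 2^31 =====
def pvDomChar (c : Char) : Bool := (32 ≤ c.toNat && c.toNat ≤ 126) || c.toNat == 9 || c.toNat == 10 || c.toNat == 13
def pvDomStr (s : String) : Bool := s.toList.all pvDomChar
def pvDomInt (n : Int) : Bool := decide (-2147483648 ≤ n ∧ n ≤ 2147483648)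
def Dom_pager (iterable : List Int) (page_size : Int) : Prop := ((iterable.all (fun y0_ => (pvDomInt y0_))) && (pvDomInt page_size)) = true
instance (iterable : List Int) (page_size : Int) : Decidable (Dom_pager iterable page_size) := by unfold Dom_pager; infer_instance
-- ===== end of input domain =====

-- B batches by stride-indexed slicing instead of A's count/append/flush loop (idiomatic rewrite);
-- equivalence is claimed for page_size ≥ 1; return value only (both are generators, neither mutates its input).


-- ===== PORT A =====
def pager (iterable : List Int) (page_size : Int) : List (List Int) :=
  let r := iterable.foldl
    (fun (s : List (List Int) × List Int × Int) (x : Int) =>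
      let count := s.2.2 + 1
      let page := s.2.1 ++ [x]
      if count ≥ page_size then (s.1 ++ [page], ([] : List Int), (0 : Int))
      else (s.1, page, count))
    (([] : List (List Int)), ([] : List Int), (0 : Int))
  if r.2.1 ≠ [] then r.1 ++ [r.2.1] else r.1

-- ===== PORT B =====
def pager_alt (iterable : List Int) (page_size : Int) : List (List Int) :=
  (PySem.List.pyRange 0 (iterable.length : Int) page_size).map
    (fun i => PySem.List.slice iterable (some i) (some (i + page_size)))

-- ===== PRECONDITION & SPEC =====
-- Pre_ excludes page_size ≤ 0: there B's range(0, n, page_size) raises ValueError (step 0) or is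
-- empty (negative step), while A's 'count >= page_size' test is accidentally always true and emits
-- each element as a singleton — a degenerate corner no caller specifies.
def Pre_pager (iterable : List Int) (page_size : Int) : Prop := 1 ≤ page_size
instance (iterable : List Int) (page_size : Int) : Decidable (Pre_pager iterable page_size) := by unfold Pre_pager; infer_instance
def pvWitness_pager : List Int × Int := ([1, 2, 3], 2)
def Spec_pager (iterable : List Int) (page_size : Int) (out : List (List Int)) : Prop := out = pager_alt iterable page_size
instance (iterable : List Int) (page_size : Int) (out : List (List Int)) : Decidable (Spec_pager iterable page_size out) := by unfold Spec_pager; infer_instance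

-- ===== CLAIM (what is proved, stated in full; the proofs are below) =====
def Claim_equal_pager : Prop := ∀ (iterable : List Int) (page_size : Int), Dom_pager iterable page_size → Pre_pager iterable page_size → Spec_pager iterable page_size (pager iterable page_size)

-- ===== LEMMAS AND PROOFS =====

-- Common shape both ports are reduced to: chunks of size n.
def pvChunk (xs : List Int) (n : Nat) : List (List Int) :=
  if h : xs = [] ∨ n = 0 then [] else xs.take n :: pvChunk (xs.drop n) n
termination_by xs.length
decreasing_by
  push_neg at h
  have hx : 0 < xs.length := List.length_pos_of_ne_nil h.1
  simp only [List.length_drop]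
  omega

theorem pvChunk_nil (n : Nat) : pvChunk [] n = [] := by
  rw [pvChunk]; simp

-- cons form of pyRange for a positive step
theorem pyRange_pos_cons (a b s : Int) (hs : 0 < s) (hab : a < b) :
    PySem.List.pyRange a b s = a :: PySem.List.pyRange (a + s) b s := by
  rw [PySem.List.pyRange_of_pos _ _ hs, PySem.List.pyRange_of_pos _ _ hs]
  have key : b - a + s - 1 = (b - a - 1) + 1 * s := by ring
  have h1 : (b - a + s - 1) / s = (b - a - 1) / s + 1 := by
    rw [key, Int.add_mul_ediv_right _ _ (by omega : s ≠ 0)]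
  have hq : 0 ≤ (b - a - 1) / s := Int.ediv_nonneg (by omega) (by omega)
  by_cases hab' : a + s < b
  · have h2 : b - (a + s) + s - 1 = b - a - 1 := by ring
    rw [if_pos hab, if_pos hab', h2, h1]
    have : ((b - a - 1) / s + 1).toNat = ((b - a - 1) / s).toNat + 1 := by omega
    rw [this, List.range_succ_eq_map]
    simp only [List.map_cons, List.map_map]
    congr 1
    · simp
    · apply List.map_congr_left
      intro k _
      simp only [Function.comp_apply]
      push_cast
      ring
  · -- last block: b ≤ a + s, so the remaining range is a single element
    have hz : (b - a - 1) / s = 0 := Int.ediv_eq_zero_of_lt (by omega) (by omega)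
    rw [if_pos hab, if_neg hab', h1, hz]
    simp

theorem pyRange_pos_nil (a b s : Int) (hs : 0 < s) (hab : b ≤ a) :
    PySem.List.pyRange a b s = [] := by
  rw [PySem.List.pyRange_of_pos _ _ hs, if_neg (by omega)]
  simp

-- B's stride-slice map computes pvChunk
theorem alt_go (ys : List Int) (s : Int) (hs : 1 ≤ s) :
    ∀ (m : Nat) (c : Int), 0 ≤ c → ys.length - c.toNat ≤ m →
      (PySem.List.pyRange c (ys.length : Int) s).map
        (fun i => PySem.List.slice ys (some i) (some (i + s)))
      = pvChunk (ys.drop c.toNat) s.toNat := by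
  intro m
  induction m with
  | zero =>
    intro c hc hm
    have hcl : (ys.length : Int) ≤ c := by omega
    rw [pyRange_pos_nil _ _ _ (by omega) hcl]
    have : ys.drop c.toNat = [] := List.drop_eq_nil_of_le (by omega)
    rw [this, pvChunk_nil]
    simp
  | succ m ih =>
    intro c hc hm
    by_cases hlt : c < (ys.length : Int)
    · have h1 : c.toNat < ys.length := by omega
      have h2 : (c + s).toNat = c.toNat + s.toNat := by omega
      rw [pyRange_pos_cons _ _ _ (by omega) hlt]
      simp only [List.map_cons]
      have hslice : PySem.List.slice ys (some c) (some (c + s))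
          = (ys.drop c.toNat).take s.toNat := by
        rw [PySem.List.slice_toNat ys hc (by omega)]
        congr 1
        omega
      have hrest := ih (c + s) (by omega) (by omega)
      have hne : ys.drop c.toNat ≠ [] := by
        intro hnil
        have := congrArg List.length hnil
        simp at this
        omega
      have hR : pvChunk (ys.drop c.toNat) s.toNat
          = (ys.drop c.toNat).take s.toNat
            :: pvChunk ((ys.drop c.toNat).drop s.toNat) s.toNat := by
        rw [pvChunk, dif_neg (by push_neg; exact ⟨hne, by omega⟩)]
      rw [hslice, hR, List.drop_drop]
      have h3 : c.toNat + s.toNat = (c + s).toNat := by omega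
      rw [h3, hrest]
    · rw [pyRange_pos_nil _ _ _ (by omega) (by omega)]
      have : ys.drop c.toNat = [] := List.drop_eq_nil_of_le (by omega)
      rw [this, pvChunk_nil]
      simp

theorem pager_alt_eq_chunk (iterable : List Int) (page_size : Int) (hs : 1 ≤ page_size) :
    pager_alt iterable page_size = pvChunk iterable page_size.toNat := by
  unfold pager_alt
  have h := alt_go iterable page_size hs iterable.length 0 (by omega) (by omega)
  simpa using h

-- A's fold invariant
theorem pager_go (n : Int) (hs : 1 ≤ n) :
    ∀ (xs : List Int) (pages : List (List Int)) (page : List Int) (k : Int),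
      k = (page.length : Int) → page.length < n.toNat →
      (let r := xs.foldl
          (fun (s : List (List Int) × List Int × Int) (x : Int) =>
            let count := s.2.2 + 1
            let page := s.2.1 ++ [x]
            if count ≥ n then (s.1 ++ [page], ([] : List Int), (0 : Int))
            else (s.1, page, count))
          (pages, page, k)
       if r.2.1 ≠ [] then r.1 ++ [r.2.1] else r.1)
      = pages ++ pvChunk (page ++ xs) n.toNat := by
  intro xs
  induction xs with
  | nil =>
    intro pages page k hk hlen
    simp only [List.foldl_nil, List.append_nil]
    by_cases hp : page = []
    · subst hp
      simp [pvChunk_nil]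
    · rw [if_pos (by simpa using hp)]
      rw [pvChunk, dif_neg (by push_neg; exact ⟨hp, by omega⟩)]
      rw [List.take_of_length_le (by omega), List.drop_eq_nil_of_le (by omega), pvChunk_nil]
  | cons x xs ih =>
    intro pages page k hk hlen
    simp only [List.foldl_cons]
    by_cases hfull : k + 1 ≥ n
    · rw [if_pos hfull]
      have hlen1 : (page ++ [x]).length = n.toNat := by
        simp only [List.length_append, List.length_cons, List.length_nil]
        omega
      have := ih (pages ++ [page ++ [x]]) [] 0 (by simp) (by simp; omega)
      simp only [List.nil_append] at this
      rw [this]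
      have hsplit : page ++ x :: xs = (page ++ [x]) ++ xs := by simp
      have hR : pvChunk ((page ++ [x]) ++ xs) n.toNat
          = (page ++ [x]) :: pvChunk xs n.toNat := by
        rw [pvChunk, dif_neg (by
          push_neg
          refine ⟨fun hnil => ?_, by omega⟩
          simpa using congrArg List.length hnil)]
        rw [List.take_left' hlen1, List.drop_left' hlen1]
      rw [hsplit, hR]
      simp
    · rw [if_neg hfull]
      have := ih pages (page ++ [x]) (k + 1)
        (by simp [hk]) (by simp; omega)
      rw [this]
      simp

theorem pager_eq_chunk (iterable : List Int) (page_size : Int) (hs : 1 ≤ page_size) :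
    pager iterable page_size = pvChunk iterable page_size.toNat := by
  unfold pager
  have h := pager_go page_size hs iterable [] [] 0 (by simp) (by simp; omega)
  simpa using h

-- ===== VERDICT (by name: the statement is the Claim_ definition above) =====
theorem pager_spec : Claim_equal_pager := by
  intro iterable page_size _ hpre
  unfold Spec_pager
  rw [pager_eq_chunk iterable page_size hpre, pager_alt_eq_chunk iterable page_size hpre]
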